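-- pv_equiv track=rewrite | github.com/stringconstant/algorithmic_problem_solution | broken_necklace.py | calculate
-- ===== SOURCE A (Python) =====
-- def calculate(necklace):
-- 	largest = 0
-- 	for index in range(0,len(necklace)-1):
-- 		curr = 0
-- 		left = necklace[index]
-- 		right = necklace[index + 1]
-- 		prev = index
-- 		after = index + 1
-- 		while prev >= 0 and necklace[prev] == left:
-- 			curr += 1
-- 			prev -= 1
--
-- 		while after <= len(necklace) - 1 and necklace[after] == right:
-- 			curr += 1
-- 			after += 1
--
-- 		if curr >= largest:
-- 			largest = curr
--
-- 	return largest
-- ===== SOURCE B (Python) =====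
-- def _back_runs(s):
--     # runs[i] = length of the maximal block of equal characters ending at position i
--     runs = []
--     for i, ch in enumerate(s):
--         if i > 0 and ch == s[i - 1]:
--             runs.append(runs[-1] + 1)
--         else:
--             runs.append(1)
--     return runs
--
--
-- def calculate(necklace):
--     back = _back_runs(necklace)
--     fwd = _back_runs(necklace[::-1])[::-1]
--     return max((x + y for x, y in zip(back, fwd[1:])), default=0)
-- ===== Notes on version B (the rewrite author's own statement) =====
-- stated objective: faster
-- what changed: A rescans left and right from every split point (quadratic); B makes two linear passes computing run lengths ending at each index (on the string and its reversal) and combines them per split point.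
import Mathlib
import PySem

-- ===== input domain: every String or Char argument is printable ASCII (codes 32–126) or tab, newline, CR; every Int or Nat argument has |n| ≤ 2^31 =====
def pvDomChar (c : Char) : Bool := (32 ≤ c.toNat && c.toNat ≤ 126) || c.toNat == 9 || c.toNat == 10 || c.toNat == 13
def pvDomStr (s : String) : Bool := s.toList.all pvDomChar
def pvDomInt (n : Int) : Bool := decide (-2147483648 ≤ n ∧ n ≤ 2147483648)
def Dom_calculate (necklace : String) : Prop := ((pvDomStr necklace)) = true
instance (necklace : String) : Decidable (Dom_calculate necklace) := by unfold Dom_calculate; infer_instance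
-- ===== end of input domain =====

-- B replaces A's per-split rescans by two linear run-length passes (backward runs of s and of
-- s reversed) combined per split point: O(n) instead of O(n^2).

-- ===== PORT A =====
-- 'while prev >= 0 and necklace[prev] == left: curr += 1; prev -= 1'  (prev, when ≥ 0, is always in range)
def goL (l : List Char) (c : Char) (p : Int) : Int :=
  if h : 0 ≤ p ∧ PySem.List.pyGet? l p = some c then 1 + goL l c (p - 1) else 0
termination_by (p + 1).toNat
decreasing_by omega

-- 'while after <= len(necklace) - 1 and necklace[after] == right: curr += 1; after += 1'
def goR (l : List Char) (c : Char) (a : Int) : Int :=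
  if h : a ≤ (l.length : Int) - 1 ∧ PySem.List.pyGet? l a = some c then 1 + goR l c (a + 1) else 0
termination_by ((l.length : Int) - a).toNat
decreasing_by omega

def calculate (necklace : String) : Int :=
  let l := necklace.toList
  (PySem.List.pyRange 0 ((l.length : Int) - 1) 1).foldl
    (fun largest index =>
      -- necklace[index] / necklace[index+1]: index ∈ range(0, len-1), so both are in range
      let left := PySem.List.pyGetD l index ' '
      let right := PySem.List.pyGetD l (index + 1) ' '
      let curr := goL l left index + goR l right (index + 1)
      if curr ≥ largest then curr else largest) 0

-- ===== PORT B =====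
-- Source B's _back_runs: runs[i] = length of the maximal equal-character block ending at i
def backRuns (l : List Char) : List Int :=
  (PySem.List.enumerate l).foldl
    (fun runs ic =>
      if 0 < ic.1 ∧ PySem.List.pyGet? l (ic.1 - 1) = some ic.2 then
        runs ++ [PySem.List.pyGetD runs (-1) 0 + 1]    -- runs.append(runs[-1] + 1)
      else
        runs ++ [1]) []

def calculate_alt (necklace : String) : Int :=
  let l := necklace.toList
  let back := backRuns l
  -- necklace[::-1] is reversal (PySem.List.slice?_none_none_neg_one), applied before and after _back_runs
  let fwd := (backRuns l.reverse).reverse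
  PySem.List.maxD ((back.zip (PySem.List.slice fwd (some 1) none)).map (fun p => p.1 + p.2))
    (fun x => x) 0

-- ===== PRECONDITION & SPEC =====
def Spec_calculate (necklace : String) (out : Int) : Prop := out = calculate_alt necklace
instance (necklace : String) (out : Int) : Decidable (Spec_calculate necklace out) := by unfold Spec_calculate; infer_instance

-- ===== CLAIM (what is proved, stated in full; the proofs are below) =====
def Claim_equal_calculate : Prop := ∀ (necklace : String), Dom_calculate necklace → Spec_calculate necklace (calculate necklace)

-- ===== LEMMAS AND PROOFS =====

-- length of the run of equal characters ending at index i
def backAt (l : List Char) : Nat → Int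
  | 0 => 1
  | i + 1 => if l[i]? = l[i + 1]? then backAt l i + 1 else 1

-- length of the run of equal characters starting at index i
def fwdAt (l : List Char) (i : Nat) : Int :=
  if h : i + 1 < l.length ∧ l[i + 1]? = l[i]? then fwdAt l (i + 1) + 1 else 1
termination_by l.length - i
decreasing_by omega

theorem backAt_pos (l : List Char) (i : Nat) : 1 ≤ backAt l i := by
  induction i with
  | zero => simp [backAt]
  | succ k ih => rw [backAt]; split <;> omega

theorem fwdAt_pos (l : List Char) (i : Nat) : 1 ≤ fwdAt l i := by
  rw [fwdAt]; split
  · have := fwdAt_pos l (i + 1); omega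
  · omega
termination_by l.length - i
decreasing_by omega

theorem goL_eq (l : List Char) (c : Char) (i : Nat) (h : l[i]? = some c) :
    goL l c (i : Int) = backAt l i := by
  induction i with
  | zero =>
    rw [goL, dif_pos ⟨le_refl 0, by rw [show ((0:Nat):Int) = 0 from rfl, PySem.List.pyGet?_zero]; exact h⟩,
      goL, dif_neg (by norm_num)]
    simp [backAt]
  | succ k ih =>
    have hk : ((k + 1 : Nat) : Int) = (k : Int) + 1 := by push_cast; ring
    rw [goL, dif_pos ⟨by omega, by rw [PySem.List.pyGet?_natCast]; exact h⟩,
      show ((k + 1 : Nat) : Int) - 1 = (k : Int) from by push_cast; ring]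
    by_cases hc : l[k]? = some c
    · rw [ih hc, backAt, if_pos (by rw [hc, h])]; omega
    · rw [goL, dif_neg (by rintro ⟨-, h2⟩; rw [PySem.List.pyGet?_natCast] at h2; exact hc h2),
        backAt, if_neg (by rw [h]; exact hc)]
      norm_num

theorem goR_eq (l : List Char) (c : Char) (i : Nat) (h : l[i]? = some c) :
    goR l c (i : Int) = fwdAt l i := by
  have hi : i < l.length := by
    rcases lt_or_ge i l.length with h' | h'
    · exact h'
    · rw [List.getElem?_eq_none h'] at h; cases h
  rw [goR, dif_pos ⟨by omega, by rw [PySem.List.pyGet?_natCast]; exact h⟩,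
    show ((i : Int) + 1) = ((i + 1 : Nat) : Int) from by push_cast; ring, fwdAt]
  by_cases hc : i + 1 < l.length ∧ l[i + 1]? = l[i]?
  · rw [dif_pos hc, goR_eq l c (i + 1) (by rw [hc.2, h])]; omega
  · rw [dif_neg hc, goR, dif_neg (by
      rintro ⟨h1, h2⟩
      rw [PySem.List.pyGet?_natCast] at h2
      exact hc ⟨by omega, by rw [h2, h]⟩)]
    norm_num
termination_by l.length - i
decreasing_by omega

theorem backRuns_aux (l : List Char) (j : Nat) (acc : List Int)
    (hacc : acc = (List.range j).map (backAt l)) (hj : j ≤ l.length) :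
    (PySem.List.enumerate (l.drop j) (j : Int)).foldl
      (fun runs ic =>
        if 0 < ic.1 ∧ PySem.List.pyGet? l (ic.1 - 1) = some ic.2 then
          runs ++ [PySem.List.pyGetD runs (-1) 0 + 1]
        else runs ++ [1]) acc
    = (List.range l.length).map (backAt l) := by
  by_cases hlt : j < l.length
  · rw [List.drop_eq_getElem_cons hlt, PySem.List.enumerate_cons, List.foldl_cons]
    have step :
        (if 0 < (j : Int) ∧ PySem.List.pyGet? l ((j : Int) - 1) = some l[j] then
          acc ++ [PySem.List.pyGetD acc (-1) 0 + 1] else acc ++ [1])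
        = (List.range (j + 1)).map (backAt l) := by
      match j with
      | 0 => simp [hacc, backAt]
      | k + 1 =>
        have hk : ((k + 1 : Nat) : Int) - 1 = (k : Int) := by push_cast; ring
        have hacc' : acc = (List.range k).map (backAt l) ++ [backAt l k] := by
          rw [hacc, List.range_succ, List.map_append]; rfl
        rw [hk]
        by_cases hc : l[k]? = some l[k + 1]
        · rw [if_pos ⟨by omega, by rw [PySem.List.pyGet?_natCast]; exact hc⟩,
              hacc', PySem.List.pyGetD_neg_one_append_singleton]
          rw [List.range_succ (n := k + 1), List.map_append, ← hacc']
          have : backAt l (k + 1) = backAt l k + 1 := by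
            rw [backAt, if_pos (by rw [hc, List.getElem?_eq_getElem hlt])]
          simp [hacc', this, List.range_succ]
        · rw [if_neg (by rintro ⟨-, h2⟩; rw [PySem.List.pyGet?_natCast] at h2; exact hc h2)]
          rw [List.range_succ (n := k + 1), List.map_append]
          have : backAt l (k + 1) = 1 := by
            rw [backAt, if_neg (by rw [List.getElem?_eq_getElem hlt]; exact hc)]
          simp [hacc, this]
    rw [step]
    have : ((j : Int) + 1) = ((j + 1 : Nat) : Int) := by push_cast; ring
    rw [this]
    exact backRuns_aux l (j + 1) _ rfl (by omega)
  · have hj' : j = l.length := by omega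
    rw [List.drop_eq_nil_of_le (by omega)]
    simpa [PySem.List.enumerate, hacc] using by rw [hj']
termination_by l.length - j
decreasing_by omega

theorem backRuns_eq (l : List Char) : backRuns l = (List.range l.length).map (backAt l) := by
  have := backRuns_aux l 0 [] (by simp) (by omega)
  simpa [backRuns] using this

theorem backAt_reverse (l : List Char) (i : Nat) (hi : i < l.length) :
    backAt l.reverse (l.length - 1 - i) = fwdAt l i := by
  rw [fwdAt]
  by_cases hc : i + 1 < l.length ∧ l[i + 1]? = l[i]?
  · rw [dif_pos hc]
    have h1 : l.length - 1 - i = (l.length - 2 - i) + 1 := by omega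
    rw [h1, backAt, if_pos]
    · have h2 : l.length - 2 - i = l.length - 1 - (i + 1) := by omega
      rw [h2, backAt_reverse l (i + 1) (by omega)]
    · rw [List.getElem?_reverse (by omega), List.getElem?_reverse (by omega)]
      have e1 : l.length - 1 - (l.length - 2 - i) = i + 1 := by omega
      have e2 : l.length - 1 - (l.length - 2 - i + 1) = i := by omega
      rw [e1, e2, hc.2]
  · rw [dif_neg hc]
    rcases Nat.eq_zero_or_pos (l.length - 1 - i) with h0 | h0
    · rw [h0, backAt]
    · have h1 : l.length - 1 - i = (l.length - 2 - i) + 1 := by omega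
      rw [h1, backAt, if_neg]
      rw [List.getElem?_reverse (by omega), List.getElem?_reverse (by omega)]
      have e1 : l.length - 1 - (l.length - 2 - i) = i + 1 := by omega
      have e2 : l.length - 1 - (l.length - 2 - i + 1) = i := by omega
      rw [e1, e2]
      intro hcon
      exact hc ⟨by omega, hcon⟩
termination_by l.length - i
decreasing_by omega

theorem fwd_eq (l : List Char) :
    (backRuns l.reverse).reverse = (List.range l.length).map (fwdAt l) := by
  rw [backRuns_eq]
  apply List.ext_getElem (by simp)
  intro i h1 h2
  simp only [List.getElem_reverse, List.getElem_map, List.getElem_range]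
  simp only [List.length_map, List.length_range, List.length_reverse] at h1 ⊢
  exact backAt_reverse l i h1

theorem maxD_eq_foldl (xs : List Int) (hpos : ∀ x ∈ xs, 0 ≤ x) :
    PySem.List.maxD xs (fun x => x) 0 = xs.foldl max 0 := by
  cases xs with
  | nil => simp [PySem.List.maxD, PySem.List.max?]
  | cons x t =>
    rw [PySem.List.maxD, PySem.List.max?_id_cons, Option.getD_some, List.foldl_cons,
      max_eq_right (hpos x (by simp))]

-- ===== VERDICT (by name: the statement is the Claim_ definition above) =====
theorem calculate_spec : Claim_equal_calculate := by
  intro necklace _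
  unfold Spec_calculate
  simp only [calculate, calculate_alt]
  set l := necklace.toList with hl
  set n := l.length with hn
  -- B's combined list is (range (n-1)).map h, h k = backAt l k + fwdAt l (k+1)
  have hcomb :
      ((backRuns l).zip (PySem.List.slice ((backRuns l.reverse).reverse) (some 1) none)).map
        (fun p => p.1 + p.2)
      = (List.range (n - 1)).map (fun k => backAt l k + fwdAt l (k + 1)) := by
    rw [PySem.List.slice_from_one, backRuns_eq, fwd_eq]
    apply List.ext_getElem
    · simp [← hn]
    · intro i h1 h2
      simp only [List.length_map, List.length_zip, List.length_range, List.length_tail,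
        ← hn] at h1 h2
      simp only [List.getElem_map, List.getElem_zip, List.getElem_range,
        List.getElem_tail, List.getElem_map, List.getElem_range]
  rw [hcomb, maxD_eq_foldl _ (by
    intro x hx
    simp only [List.mem_map, List.mem_range] at hx
    obtain ⟨k, -, rfl⟩ := hx
    have := backAt_pos l k; have := fwdAt_pos l (k + 1); omega)]
  -- A's fold equals the same running max
  rw [PySem.List.pyRange_one]
  have hm : (((n : Int) - 1) - 0).toNat = n - 1 := by omega
  rw [hm, List.foldl_map, List.foldl_map]
  apply PySem.List.foldl_congr_mem
  intro acc k hk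
  simp only [List.mem_range] at hk
  have hz : (0 : Int) + (k : Int) = (k : Int) := by ring
  have hk1 : ((k : Int) + 1) = ((k + 1 : Nat) : Int) := by push_cast; ring
  simp only [hz, hk1]
  have e1 : PySem.List.pyGetD l (k : Int) ' ' = l[k] := by
    rw [PySem.List.pyGetD_natCast]; exact List.getD_eq_getElem l ' ' (by omega)
  have e2 : PySem.List.pyGetD l ((k + 1 : Nat) : Int) ' ' = l[k + 1] := by
    rw [PySem.List.pyGetD_natCast]; exact List.getD_eq_getElem l ' ' (by omega)
  rw [e1, e2, goL_eq l _ k (List.getElem?_eq_getElem (by omega)),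
    goR_eq l _ (k + 1) (List.getElem?_eq_getElem (by omega))]
  rcases le_or_gt acc (backAt l k + fwdAt l (k + 1)) with h | h
  · rw [if_pos (by omega), max_eq_right h]
  · rw [if_neg (by omega), max_eq_left (by omega)]
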